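-- pv_equiv track=rewrite | github.com/CompLin/nheengatu | src/BuildSample.py | generate_sample
-- ===== SOURCE A (Python) =====
-- def generate_sample(sentences, target_ambiguities):
--     sample = []
--     cumulative_ambiguities = 0
--     remaining_sentences = []
--
--     for sentence_id, ambiguities in sentences:
--         if cumulative_ambiguities >= target_ambiguities:
--             remaining_sentences.append((sentence_id, ambiguities))
--         else:
--             sample.append((sentence_id, ambiguities))
--             cumulative_ambiguities += ambiguities
--
--     return sample, cumulative_ambiguities, remaining_sentences
-- ===== SOURCE B (Python) =====
-- def generate_sample(sentences, target_ambiguities):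
--     # prefix-sum threshold search: find first prefix sum >= target, then slice
--     prefix = [0]
--     for _, a in sentences:
--         prefix.append(prefix[-1] + a)
--     i = len(sentences)
--     for k, p in enumerate(prefix):
--         if p >= target_ambiguities:
--             i = k
--             break
--     return sentences[:i], prefix[i], sentences[i:]
-- ===== Notes on version B (the rewrite author's own statement) =====
-- stated objective: alternative
-- what changed: Replaces A's per-element branching loop with accumulator state by building the prefix-sum list once, scanning it for the first index where the prefix sum reaches the target, and returning slices of the input at that index.
import Mathlib
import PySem

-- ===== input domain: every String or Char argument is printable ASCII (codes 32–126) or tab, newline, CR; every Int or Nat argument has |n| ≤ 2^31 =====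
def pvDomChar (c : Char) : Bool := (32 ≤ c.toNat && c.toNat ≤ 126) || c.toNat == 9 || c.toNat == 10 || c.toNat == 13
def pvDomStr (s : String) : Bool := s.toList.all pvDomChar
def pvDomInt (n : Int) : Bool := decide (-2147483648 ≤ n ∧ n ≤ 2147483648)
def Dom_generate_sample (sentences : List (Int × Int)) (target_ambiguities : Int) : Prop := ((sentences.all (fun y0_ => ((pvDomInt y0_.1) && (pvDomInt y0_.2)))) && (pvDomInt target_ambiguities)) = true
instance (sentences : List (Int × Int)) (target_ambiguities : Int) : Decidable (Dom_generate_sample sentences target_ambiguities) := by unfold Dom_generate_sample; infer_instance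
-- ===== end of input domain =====

-- B replaces A's branching element-by-element loop by a prefix-sum threshold search plus slices (objective: alternative decomposition).

-- ===== PORT A =====
def generate_sample (sentences : List (Int × Int)) (target_ambiguities : Int) : (List (Int × Int)) × Int × (List (Int × Int)) :=
  sentences.foldl
    (fun (st : (List (Int × Int)) × Int × (List (Int × Int))) x =>
      if st.2.1 ≥ target_ambiguities then (st.1, st.2.1, st.2.2 ++ [x])
      else (st.1 ++ [x], st.2.1 + x.2, st.2.2))
    ([], 0, [])

-- ===== PORT B =====
-- prefix = [0]; for _, a in sentences: prefix.append(prefix[-1] + a)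
def pvPrefix (sentences : List (Int × Int)) : List Int :=
  sentences.foldl (fun p x => p ++ [p.getLastD 0 + x.2]) [0]

-- the 'for k, p in enumerate(prefix): if p >= t: i = k; break' loop
def pvFirstGE : List Int → Int → Option Nat
  | [], _ => none
  | p :: ps, t => if p ≥ t then some 0 else (pvFirstGE ps t).map (· + 1)

def generate_sample_alt (sentences : List (Int × Int)) (target_ambiguities : Int) : (List (Int × Int)) × Int × (List (Int × Int)) :=
  let pre := pvPrefix sentences
  let i := (pvFirstGE pre target_ambiguities).getD sentences.length
  (sentences.take i, pre.getD i 0, sentences.drop i)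

-- ===== PRECONDITION & SPEC =====
def Spec_generate_sample (sentences : List (Int × Int)) (target_ambiguities : Int) (out : (List (Int × Int)) × Int × (List (Int × Int))) : Prop := out = generate_sample_alt sentences target_ambiguities
instance (sentences : List (Int × Int)) (target_ambiguities : Int) (out : (List (Int × Int)) × Int × (List (Int × Int))) : Decidable (Spec_generate_sample sentences target_ambiguities out) := by unfold Spec_generate_sample; infer_instance

-- ===== CLAIM (what is proved, stated in full; the proofs are below) =====
def Claim_equal_generate_sample : Prop := ∀ (sentences : List (Int × Int)) (target_ambiguities : Int), Dom_generate_sample sentences target_ambiguities → Spec_generate_sample sentences target_ambiguities (generate_sample sentences target_ambiguities)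

-- ===== LEMMAS AND PROOFS =====

-- common reference function: greedy take until threshold crossed
def pvGo : List (Int × Int) → Int → (List (Int × Int)) × Int × (List (Int × Int))
  | [], _ => ([], 0, [])
  | x :: xs, t =>
    if t ≤ 0 then ([], 0, x :: xs)
    else
      let g := pvGo xs (t - x.2)
      (x :: g.1, g.2.1 + x.2, g.2.2)

theorem pvGo_nonpos (xs : List (Int × Int)) (t : Int) (h : t ≤ 0) :
    pvGo xs t = ([], 0, xs) := by
  cases xs with
  | nil => rfl
  | cons x xs => simp [pvGo, h]

-- ----- A = pvGo -----

theorem foldA_dump (t : Int) (xs : List (Int × Int))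
    (s r : List (Int × Int)) (c : Int) (h : c ≥ t) :
    xs.foldl (fun (st : (List (Int × Int)) × Int × (List (Int × Int))) x =>
      if st.2.1 ≥ t then (st.1, st.2.1, st.2.2 ++ [x])
      else (st.1 ++ [x], st.2.1 + x.2, st.2.2)) (s, c, r) = (s, c, r ++ xs) := by
  induction xs generalizing r with
  | nil => simp
  | cons x xs ih => simp [List.foldl_cons, h, ih]

theorem foldA_go (t : Int) (xs : List (Int × Int))
    (s r : List (Int × Int)) (c : Int) (h : c < t) :
    xs.foldl (fun (st : (List (Int × Int)) × Int × (List (Int × Int))) x =>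
      if st.2.1 ≥ t then (st.1, st.2.1, st.2.2 ++ [x])
      else (st.1 ++ [x], st.2.1 + x.2, st.2.2)) (s, c, r)
    = (s ++ (pvGo xs (t - c)).1, c + (pvGo xs (t - c)).2.1, r ++ (pvGo xs (t - c)).2.2) := by
  induction xs generalizing s c with
  | nil => simp [pvGo]
  | cons x xs ih =>
    have hne : ¬ c ≥ t := not_le.mpr h
    by_cases h2 : c + x.2 ≥ t
    · have ht : t - c - x.2 ≤ 0 := by omega
      have ht' : ¬ t - c ≤ 0 := by omega
      simp [List.foldl_cons, hne, foldA_dump t xs _ _ _ h2, pvGo, ht',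
        pvGo_nonpos xs _ ht]
    · have h2' : c + x.2 < t := by omega
      have ht' : ¬ t - c ≤ 0 := by omega
      rw [List.foldl_cons]
      simp only [hne, if_false]
      rw [ih (s ++ [x]) (c + x.2) h2']
      have harg : t - (c + x.2) = t - c - x.2 := by ring
      rw [harg]
      simp only [pvGo, ht']
      refine Prod.ext ?_ (Prod.ext ?_ ?_)
      · simp
      · simp; ring
      · rfl

theorem A_eq_go (xs : List (Int × Int)) (t : Int) :
    generate_sample xs t = pvGo xs t := by
  unfold generate_sample
  by_cases h : (0 : Int) ≥ t
  · rw [foldA_dump t xs [] [] 0 h, pvGo_nonpos xs t (by omega)]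
    simp
  · rw [foldA_go t xs [] [] 0 (by omega)]
    simp

-- ----- B = pvGo -----

-- pure prefix-sum list of the tail, starting from running value c
def pvPref (c : Int) : List (Int × Int) → List Int
  | [] => []
  | x :: xs => (c + x.2) :: pvPref (c + x.2) xs

theorem pvPref_len (c : Int) (xs : List (Int × Int)) : (pvPref c xs).length = xs.length := by
  induction xs generalizing c with
  | nil => rfl
  | cons x xs ih => simp [pvPref, ih]

theorem foldB_pref (xs : List (Int × Int)) (p : List Int) (c : Int) :
    xs.foldl (fun p x => p ++ [p.getLastD 0 + x.2]) (p ++ [c]) = p ++ [c] ++ pvPref c xs := by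
  induction xs generalizing p c with
  | nil => simp [pvPref]
  | cons x xs ih =>
    rw [List.foldl_cons]
    have hl : (p ++ [c]).getLastD 0 = c := by simp
    rw [hl, ih (p ++ [c]) (c + x.2)]
    simp [pvPref]

theorem pvPrefix_eq (xs : List (Int × Int)) : pvPrefix xs = 0 :: pvPref 0 xs := by
  have := foldB_pref xs [] 0
  simpa [pvPrefix] using this

theorem pvPref_shift (c d : Int) (xs : List (Int × Int)) :
    pvPref (c + d) xs = (pvPref c xs).map (· + d) := by
  induction xs generalizing c with
  | nil => rfl
  | cons x xs ih =>
    simp only [pvPref, List.map_cons]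
    have h1 : c + d + x.2 = c + x.2 + d := by ring
    rw [h1, ih]

theorem pvFirstGE_map (ps : List Int) (d t : Int) :
    pvFirstGE (ps.map (· + d)) t = pvFirstGE ps (t - d) := by
  induction ps with
  | nil => rfl
  | cons p ps ih =>
    simp only [List.map_cons, pvFirstGE, ih]
    by_cases hp : p + d ≥ t
    · have hp' : p ≥ t - d := by omega
      simp [hp, hp']
    · have hp' : ¬ p ≥ t - d := by omega
      simp [hp, hp']

theorem pvFirstGE_le (ps : List Int) (t : Int) (k : Nat) (h : pvFirstGE ps t = some k) :
    k < ps.length := by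
  induction ps generalizing k with
  | nil => simp [pvFirstGE] at h
  | cons p ps ih =>
    simp only [pvFirstGE] at h
    split_ifs at h with hp
    · cases h; simp
    · cases hk : pvFirstGE ps t with
      | none => simp [hk] at h
      | some k' =>
        simp [hk] at h
        subst h
        have := ih k' hk
        simp; omega

theorem B_eq_go (xs : List (Int × Int)) (t : Int) :
    generate_sample_alt xs t = pvGo xs t := by
  induction xs generalizing t with
  | nil =>
    unfold generate_sample_alt
    rw [pvPrefix_eq]
    simp only [pvPref]
    by_cases h : (0 : Int) ≥ t <;> simp [pvFirstGE, h, pvGo]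
  | cons x xs ih =>
    unfold generate_sample_alt
    rw [pvPrefix_eq]
    by_cases h : (0 : Int) ≥ t
    · simp [pvFirstGE, h, pvGo_nonpos _ t (by omega)]
    · have hlt : ¬ ((0:Int) ≥ t) := h
      have hpref : pvPref 0 (x :: xs) = (0 :: pvPref 0 xs).map (· + x.2) := by
        simp only [pvPref, List.map_cons]
        rw [pvPref_shift 0 x.2 xs]
      simp only [pvFirstGE, hlt, if_false]
      rw [hpref, pvFirstGE_map]
      have ihx := ih (t - x.2)
      unfold generate_sample_alt at ihx
      rw [pvPrefix_eq] at ihx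
      dsimp only at ihx
      simp only [pvGo, if_neg (show ¬ t ≤ 0 by omega)]
      cases hk : pvFirstGE (0 :: pvPref 0 xs) (t - x.2) with
      | none =>
        rw [hk] at ihx
        simp only [Option.getD_none] at ihx
        simp only [Option.map_none, Option.getD_none, List.length_cons]
        -- index = xs.length + 1 on the cons side
        have hlen : ((0 :: pvPref 0 xs).map (· + x.2)).length = xs.length + 1 := by
          simp [pvPref_len]
        rw [← ihx]
        simp only [List.take_succ_cons, List.drop_succ_cons]
        refine Prod.ext rfl (Prod.ext ?_ rfl)
        have hin : xs.length < (0 :: pvPref 0 xs).length := by simp [pvPref_len]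
        rw [List.getD_cons_succ, List.getD_eq_getElem _ _ (by simpa using hin),
            List.getD_eq_getElem _ _ hin]
        simp only [List.getElem_map]
      | some k =>
        have hkl : k < (0 :: pvPref 0 xs).length := pvFirstGE_le _ _ _ hk
        rw [hk] at ihx
        simp only [Option.getD_some] at ihx
        simp only [Option.map_some, Option.getD_some]
        rw [← ihx]
        simp only [List.take_succ_cons, List.drop_succ_cons]
        refine Prod.ext rfl (Prod.ext ?_ rfl)
        rw [List.getD_cons_succ, List.getD_eq_getElem _ _ (by simpa using hkl),
            List.getD_eq_getElem _ _ hkl]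
        simp only [List.getElem_map]

-- ===== VERDICT (by name: the statement is the Claim_ definition above) =====
theorem generate_sample_spec : Claim_equal_generate_sample := by
  intro xs t _
  unfold Spec_generate_sample
  rw [A_eq_go, B_eq_go]
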